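-- pv_equiv track=rewrite | github.com/Nafaryus27/pySIMS | pySIMS.py | read_isotope_reference
-- ===== SOURCE A (Python) =====
-- def read_isotope_reference (ref):
--     elem = ''
--     int_mass_str = ''
--     inmass = True
--     for c in ref:
--         if not c.isdigit () and not inmass :
--             elem += c
--         if not c.isdigit () and inmass:
--             inmass = not inmass
--             elem += c
--         if c.isdigit () and inmass :
--             int_mass_str += c
--         if c.isdigit () and not inmass :
--             elem += c
--     int_mass = int (int_mass_str)
--     return int_mass, elem
-- ===== SOURCE B (Python) =====
-- def read_isotope_reference(ref):
--     i = 0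
--     while i < len(ref) and ref[i].isdigit():
--         i += 1
--     return int(ref[:i]), ref[i:]
-- ===== Notes on version B (the rewrite author's own statement) =====
-- stated objective: simpler
-- what changed: Replaces the four-branch per-character state machine with a single boundary scan: advance an index past the leading digits, then int() the prefix and slice off the tail.
import Mathlib
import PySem

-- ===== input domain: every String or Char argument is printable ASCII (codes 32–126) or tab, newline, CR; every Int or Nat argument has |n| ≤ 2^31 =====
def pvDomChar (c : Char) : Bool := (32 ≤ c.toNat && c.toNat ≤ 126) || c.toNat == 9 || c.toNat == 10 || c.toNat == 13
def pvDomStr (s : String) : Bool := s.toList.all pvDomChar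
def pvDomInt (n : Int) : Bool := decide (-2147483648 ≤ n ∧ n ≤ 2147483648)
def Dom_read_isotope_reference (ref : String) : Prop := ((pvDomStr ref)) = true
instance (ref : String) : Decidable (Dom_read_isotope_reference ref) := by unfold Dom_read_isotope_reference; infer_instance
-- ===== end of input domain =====

-- B changes only the decomposition (boundary scan + slice instead of a per-char state machine); equivalence of return values on Pre_ (leading digit present).

-- ===== PORT A =====
-- one loop step: the four sequential 'if' statements of A's body, on state (elem, int_mass_str, inmass)
def pvStepA (s : List Char × List Char × Bool) (c : Char) : List Char × List Char × Bool :=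
  let elem := s.1
  let mass := s.2.1
  let inmass := s.2.2
  let elem := if !(PySem.Chars.isdigit c) && !inmass then elem ++ [c] else elem
  let p := if !(PySem.Chars.isdigit c) && inmass then (!inmass, elem ++ [c]) else (inmass, elem)
  let inmass := p.1
  let elem := p.2
  let mass := if PySem.Chars.isdigit c && inmass then mass ++ [c] else mass
  let elem := if PySem.Chars.isdigit c && !inmass then elem ++ [c] else elem
  (elem, mass, inmass)

def read_isotope_reference (ref : String) : Int × String :=
  let st := ref.toList.foldl pvStepA ([], [], true)
  -- int(int_mass_str): ValueError (none) excluded by Pre_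
  (((PySem.Int.ofChars? st.2.1).getD 0), String.ofList st.1)

-- ===== PORT B =====
-- the while loop of Source B: advance past the leading digits, splitting the list at the boundary
def pvSplitDigits : List Char → List Char × List Char
  | [] => ([], [])
  | c :: cs =>
    if PySem.Chars.isdigit c then
      let p := pvSplitDigits cs
      (c :: p.1, p.2)
    else ([], c :: cs)

def read_isotope_reference_alt (ref : String) : Int × String :=
  let p := pvSplitDigits ref.toList
  (((PySem.Int.ofChars? p.1).getD 0), String.ofList p.2)

-- ===== PRECONDITION & SPEC =====
-- Pre_ excludes exactly the inputs where Python A raises ValueError converting the empty digit prefix: strings not starting with a digit (B raises there identically).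
def Pre_read_isotope_reference (ref : String) : Prop :=
  ref.toList ≠ [] ∧ PySem.Chars.isdigit ref.toList.headI = true
instance (ref : String) : Decidable (Pre_read_isotope_reference ref) := by unfold Pre_read_isotope_reference; infer_instance
def pvWitness_read_isotope_reference : String := "12C"

def Spec_read_isotope_reference (ref : String) (out : Int × String) : Prop := out = read_isotope_reference_alt ref
instance (ref : String) (out : Int × String) : Decidable (Spec_read_isotope_reference ref out) := by unfold Spec_read_isotope_reference; infer_instance

-- ===== CLAIM (what is proved, stated in full; the proofs are below) =====
def Claim_equal_read_isotope_reference : Prop := ∀ (ref : String), Dom_read_isotope_reference ref → Pre_read_isotope_reference ref → Spec_read_isotope_reference ref (read_isotope_reference ref)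

-- ===== LEMMAS AND PROOFS =====

-- once inmass is false, A only appends every remaining char to elem
lemma foldl_stepA_false (l : List Char) (elem mass : List Char) :
    l.foldl pvStepA (elem, mass, false) = (elem ++ l, mass, false) := by
  induction l generalizing elem with
  | nil => simp
  | cons c cs ih =>
    simp only [List.foldl_cons, pvStepA]
    cases h : PySem.Chars.isdigit c <;> simp [ih]

-- while inmass is true, A accumulates the leading digits into mass and switches to the false state at the first non-digit
lemma foldl_stepA_true (l : List Char) (elem mass : List Char) :
    l.foldl pvStepA (elem, mass, true) =
      (elem ++ (pvSplitDigits l).2, mass ++ (pvSplitDigits l).1, l.all PySem.Chars.isdigit) := by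
  induction l generalizing elem mass with
  | nil => simp [pvSplitDigits]
  | cons c cs ih =>
    simp only [List.foldl_cons, pvStepA, pvSplitDigits]
    cases h : PySem.Chars.isdigit c
    · simp [h, foldl_stepA_false]
    · simp [h, ih]

-- ===== VERDICT (by name: the statement is the Claim_ definition above) =====
theorem read_isotope_reference_spec : Claim_equal_read_isotope_reference := by
  intro ref _ _
  show _ = _
  simp [read_isotope_reference, read_isotope_reference_alt, foldl_stepA_true]
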